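-- pv_equiv track=rewrite | github.com/pypi-data/pypi-mirror-398 | packages/grook/grook-0.1.2-py3-none-any.whl/grook.py | fix_order
-- ===== SOURCE A (Python) =====
-- def fix_order(headers, base):
--     ordered = {}
--     for k in base:
--         if k in headers:
--             ordered[k] = headers[k]
--     for k, v in headers.items():
--         if k not in ordered:
--             ordered[k] = v
--     return ordered
-- ===== SOURCE B (Python) =====
-- def fix_order(headers, base):
--     rank = {}
--     for i, k in enumerate(base):
--         if k not in rank:
--             rank[k] = i
--     sentinel = len(base)
--     return dict(sorted(headers.items(), key=lambda kv: rank.get(kv[0], sentinel)))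
-- ===== Notes on version B (the rewrite author's own statement) =====
-- stated objective: alternative
-- what changed: A's two sequential dict-building passes (insert base keys found in headers, then append the remaining items) are replaced by building a first-occurrence rank table over base and doing one stable sort of headers.items() by rank, with len(base) as the sentinel rank for non-base keys.
import Mathlib
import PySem

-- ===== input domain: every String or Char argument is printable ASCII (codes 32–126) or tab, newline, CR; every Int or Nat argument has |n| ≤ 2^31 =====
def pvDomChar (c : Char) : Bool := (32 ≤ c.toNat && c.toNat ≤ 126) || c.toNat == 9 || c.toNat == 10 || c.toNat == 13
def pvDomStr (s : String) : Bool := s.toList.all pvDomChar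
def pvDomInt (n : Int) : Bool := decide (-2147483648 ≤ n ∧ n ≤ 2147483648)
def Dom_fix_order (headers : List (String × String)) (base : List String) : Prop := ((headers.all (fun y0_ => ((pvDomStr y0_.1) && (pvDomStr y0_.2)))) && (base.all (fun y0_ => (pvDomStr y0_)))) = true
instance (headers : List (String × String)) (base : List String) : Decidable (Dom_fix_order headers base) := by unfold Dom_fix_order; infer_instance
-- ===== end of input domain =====

-- B replaces A's two dict-building passes by a first-occurrence rank table plus one stable sort of the items (objective: alternative strategy, not claimed faster).

-- ===== PORT A =====
-- literal port of A: build `ordered` by inserting base keys present in headers, then the remaining header items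
def fix_order (headers : List (String × String)) (base : List String) : List (String × String) :=
  let h : PySem.Dict String String := PySem.Dict.mk headers
  let ordered : PySem.Dict String String :=
    base.foldl (fun d k =>
      match h.get? k with          -- 'if k in headers: ordered[k] = headers[k]'
      | some v => d.insert k v
      | none => d) PySem.Dict.empty
  let ordered :=
    headers.foldl (fun d kv => if d.contains kv.1 then d else d.insert kv.1 kv.2) ordered
  ordered.items

-- ===== PORT B =====
-- literal port of Source B: first-occurrence rank dict over base, then a stable sort of headers.items() by rank
def fix_order_alt (headers : List (String × String)) (base : List String) : List (String × String) :=
  let rank : PySem.Dict String Int :=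
    (PySem.List.enumerate base).foldl
      (fun d ik => if d.contains ik.2 then d else d.insert ik.2 ik.1) PySem.Dict.empty
  let sentinel : Int := (base.length : Int)
  (PySem.Dict.ofList (PySem.List.sorted headers (fun kv => rank.getD kv.1 sentinel))).items

-- ===== PRECONDITION & SPEC =====
-- Pre_ excludes association lists with duplicate keys: A's `headers` parameter is a Python dict,
-- whose list encoding always has pairwise-distinct keys, so such lists encode no actual input of A.
def Pre_fix_order (headers : List (String × String)) (base : List String) : Prop :=
  (headers.map Prod.fst).Nodup
instance (headers : List (String × String)) (base : List String) : Decidable (Pre_fix_order headers base) := by unfold Pre_fix_order; infer_instance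

def pvWitness_fix_order : (List (String × String)) × List String :=
  ([("b", "2"), ("a", "1"), ("x", "9")], ["a", "c", "b"])

def Spec_fix_order (headers : List (String × String)) (base : List String) (out : List (String × String)) : Prop := out = fix_order_alt headers base
instance (headers : List (String × String)) (base : List String) (out : List (String × String)) : Decidable (Spec_fix_order headers base out) := by unfold Spec_fix_order; infer_instance

-- ===== CLAIM (what is proved, stated in full; the proofs are below) =====
def Claim_equal_fix_order : Prop := ∀ (headers : List (String × String)) (base : List String), Dom_fix_order headers base → Pre_fix_order headers base → Spec_fix_order headers base (fix_order headers base)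

-- ===== LEMMAS AND PROOFS =====

-- B's rank dict, A's first loop's lookup step, and the common middle form of both results
def rankD (base : List String) : PySem.Dict String Int :=
  (PySem.List.enumerate base).foldl
    (fun d ik => if d.contains ik.2 then d else d.insert ik.2 ik.1) PySem.Dict.empty

def keyF (base : List String) (kv : String × String) : Int :=
  (rankD base).getD kv.1 (base.length : Int)

def pickH (headers : List (String × String)) (ki : String × Int) : Option (String × String) :=
  ((PySem.Dict.mk headers).get? ki.1).map (fun v => (ki.1, v))

def midL (headers : List (String × String)) (base : List String) : List (String × String) :=
  (rankD base).items.filterMap (pickH headers)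

-- first-match find? on a nodup-keyed pair list returns the member with that key
theorem find?_key_nodup {ν : Type} :
    ∀ (l : List (String × ν)), (l.map Prod.fst).Nodup → ∀ {k : String} {v : ν},
      (k, v) ∈ l → l.find? (fun p => p.1 == k) = some (k, v) := by
  intro l hnd k v hm
  induction l with
  | nil => cases hm
  | cons p t ih =>
    simp only [List.map_cons, List.nodup_cons] at hnd
    rcases List.mem_cons.mp hm with h | h
    · subst h; simp [List.find?]
    · have hne : p.1 ≠ k := by
        intro he
        exact hnd.1 (he ▸ (List.mem_map.mpr ⟨(k, v), h, rfl⟩))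
      simp only [List.find?]
      rw [show (p.1 == k) = false from beq_eq_false_iff_ne.mpr hne]
      exact ih hnd.2 h

-- A's first loop builds, item for item, pickH applied to the items of B's rank dict
theorem phase1_items (headers : List (String × String)) :
    ∀ (bs : List String) (start : Int) (r : PySem.Dict String Int) (d : PySem.Dict String String),
      d.items = r.items.filterMap (pickH headers) →
      (bs.foldl (fun d k =>
          match (PySem.Dict.mk headers).get? k with
          | some v => d.insert k v
          | none => d) d).items
        = ((PySem.List.enumerate bs start).foldl
            (fun d ik => if d.contains ik.2 then d else d.insert ik.2 ik.1) r).items.filterMap (pickH headers) := by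
  intro bs
  induction bs with
  | nil => intro start r d h; simpa [PySem.List.enumerate] using h
  | cons b t ih =>
    intro start r d h
    simp only [PySem.List.enumerate, List.foldl_cons]
    by_cases hcr : r.contains b
    · -- rank dict skips b
      simp only [hcr, if_true]
      cases hget : (PySem.Dict.mk headers).get? b with
      | none => exact ih (start + 1) r d h
      | some v =>
        -- b already has an entry in r whose pickH-image is (b, v); overwrite is the identity
        refine ih (start + 1) r (d.insert b v) ?_
        have hmem : (b, v) ∈ d.items := by
          rw [h]
          rcases List.any_eq_true.mp (by rw [PySem.Dict.contains] at hcr; exact hcr) with ⟨q, hq, hbe⟩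
          have hqb : q.1 = b := eq_of_beq hbe
          refine List.mem_filterMap.mpr ⟨q, hq, ?_⟩
          simp [pickH, hqb, hget]
        have hcd : d.contains b = true := by
          rw [PySem.Dict.contains]
          exact List.any_eq_true.mpr ⟨(b, v), hmem, by simp⟩
        have : (d.insert b v).items = d.items := by
          rw [PySem.Dict.insert, hcd]
          simp only [if_true]
          rw [show d.items = List.map id d.items by simp]
          rw [List.map_map]
          apply List.map_congr_left
          intro p hp
          by_cases hpb : (p.1 == b) = true
          · -- p has key b, hence p = (b, v) by the filterMap characterisation
            have hpb' : p.1 = b := eq_of_beq hpb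
            have : p.2 = v := by
              rw [h] at hp
              rcases List.mem_filterMap.mp hp with ⟨ki, _, hpk⟩
              simp only [pickH, Option.map_eq_some_iff] at hpk
              rcases hpk with ⟨w, hw, hpw⟩
              have h1 : ki.1 = p.1 := by rw [← hpw]
              have h2 : w = p.2 := by rw [← hpw]
              rw [h1, hpb', hget] at hw
              cases hw
              rw [← h2]
            show (if (p.1 == b) = true then (b, v) else p) = id p
            rw [if_pos hpb, ← this, ← hpb']; rfl
          · show (if (p.1 == b) = true then (b, v) else p) = id p
            rw [if_neg hpb]; rfl
        rw [this, h]
    · -- rank dict appends (b, start)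
      have hcf : r.contains b = false := by simpa using hcr
      simp only [hcf, Bool.false_eq_true, if_false]
      have hrins : (r.insert b start).items = r.items ++ [(b, start)] := by
        rw [PySem.Dict.insert, hcf]; simp
      have hdnot : d.contains b = false := by
        simp only [PySem.Dict.contains, List.any_eq_false]
        intro q hq
        rw [h] at hq
        rcases List.mem_filterMap.mp hq with ⟨ki, hki, hpk⟩
        simp only [pickH, Option.map_eq_some_iff] at hpk
        rcases hpk with ⟨w, hw, hpw⟩
        have h1 : ki.1 = q.1 := by rw [← hpw]
        simp only [Bool.not_eq_true]
        refine beq_eq_false_iff_ne.mpr ?_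
        intro he
        have : r.contains b = true := by
          rw [PySem.Dict.contains]
          exact List.any_eq_true.mpr ⟨ki, hki, by simp [h1, he]⟩
        rw [hcf] at this; cases this
      cases hget : (PySem.Dict.mk headers).get? b with
      | none =>
        refine ih (start + 1) (r.insert b start) d ?_
        rw [hrins, List.filterMap_append, h]
        simp [pickH, hget]
      | some v =>
        refine ih (start + 1) (r.insert b start) (d.insert b v) ?_
        have : (d.insert b v).items = d.items ++ [(b, v)] := by
          rw [PySem.Dict.insert, hdnot]; simp
        rw [this, hrins, List.filterMap_append, h]
        simp [pickH, hget]

-- the rank fold: nodup keys, strictly increasing values below start+len, containment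
theorem rank_facts :
    ∀ (bs : List String) (start : Int) (r : PySem.Dict String Int),
      (r.items.map Prod.fst).Nodup →
      (r.items.map Prod.snd).Pairwise (· < ·) →
      (∀ i ∈ r.items.map Prod.snd, i < start) →
      (let r' := (PySem.List.enumerate bs start).foldl
          (fun d ik => if d.contains ik.2 then d else d.insert ik.2 ik.1) r
       (r'.items.map Prod.fst).Nodup ∧
       (r'.items.map Prod.snd).Pairwise (· < ·) ∧
       (∀ i ∈ r'.items.map Prod.snd, i < start + bs.length) ∧
       (∀ k, r'.contains k = (r.contains k || bs.any (fun b => b == k)))) := by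
  intro bs
  induction bs with
  | nil =>
    intro start r h1 h2 h3
    refine ⟨h1, h2, fun i hi => by simpa using lt_of_lt_of_le (h3 i hi) (by simp), fun k => by simp [PySem.List.enumerate]⟩
  | cons b t ih =>
    intro start r h1 h2 h3
    simp only [PySem.List.enumerate, List.foldl_cons]
    by_cases hc : r.contains b
    · simp only [hc, if_true]
      have H := ih (start + 1) r h1 h2 (fun i hi => lt_trans (h3 i hi) (by omega))
      refine ⟨H.1, H.2.1, fun i hi => by have := H.2.2.1 i hi; simp only [List.length_cons]; omega,
        fun k => ?_⟩
      rw [H.2.2.2 k]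
      by_cases hbk : (b == k) = true
      · have : r.contains k = true := by
          have hbk' : b = k := eq_of_beq hbk
          rw [← hbk']; exact hc
        simp [this]
      · simp [List.any_cons, hbk]
    · have hcf : r.contains b = false := by simpa using hc
      simp only [hcf, Bool.false_eq_true, if_false]
      have hinsert : (r.insert b start).items = r.items ++ [(b, start)] := by
        rw [PySem.Dict.insert, hcf]
        simp
      have hb_not : b ∉ r.items.map Prod.fst := by
        intro hm
        rcases List.mem_map.mp hm with ⟨q, hq, he⟩
        have : r.contains b = true := by
          rw [PySem.Dict.contains]
          exact List.any_eq_true.mpr ⟨q, hq, by simp [he]⟩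
        exact hc this
      have h1' : ((r.insert b start).items.map Prod.fst).Nodup := by
        rw [hinsert]
        simp only [List.map_append, List.map_cons, List.map_nil]
        refine List.Nodup.append h1 (by simp) ?_
        intro a ha hb
        simp only [List.mem_singleton] at hb
        subst hb
        exact hb_not ha
      have h2' : ((r.insert b start).items.map Prod.snd).Pairwise (· < ·) := by
        rw [hinsert]
        simp only [List.map_append, List.map_cons, List.map_nil]
        refine List.pairwise_append.mpr ⟨h2, by simp, ?_⟩
        intro i hi j hj
        simp only [List.mem_singleton] at hj
        subst hj
        exact h3 i hi
      have h3' : ∀ i ∈ (r.insert b start).items.map Prod.snd, i < start + 1 := by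
        rw [hinsert]
        simp only [List.map_append, List.map_cons, List.map_nil]
        intro i hi
        rcases List.mem_append.mp hi with h | h
        · exact lt_trans (h3 i h) (by omega)
        · simp only [List.mem_singleton] at h; omega
      have H := ih (start + 1) (r.insert b start) h1' h2' h3'
      refine ⟨H.1, H.2.1, fun i hi => by have := H.2.2.1 i hi; simp only [List.length_cons]; omega,
        fun k => ?_⟩
      rw [H.2.2.2 k]
      have hcins : (r.insert b start).contains k = (r.contains k || (b == k)) := by
        rw [PySem.Dict.contains, hinsert]
        simp [PySem.Dict.contains, List.any_append]
      rw [hcins]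
      simp [Bool.or_assoc]

-- inserting below elements the new element must precede distributes over append
theorem insertBy_append_right {α : Type} (before : α → α → Bool) (x : α) :
    ∀ (l1 l2 : List α), (∀ y ∈ l2, before x y = true) →
      PySem.List.insertBy before x (l1 ++ l2) = PySem.List.insertBy before x l1 ++ l2 := by
  intro l1 l2 h
  induction l1 with
  | nil =>
    cases l2 with
    | nil => rfl
    | cons z zs =>
      simp only [List.nil_append, PySem.List.insertBy]
      rw [h z (by simp)]
      rfl
  | cons a t ih =>
    cases hb : before x a <;>
      simp [PySem.List.insertBy, hb, ih]

-- a stable sort splits at the maximal key value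
theorem sorted_split {α : Type} (key : α → Int) (M : Int) :
    ∀ (xs : List α), (∀ x ∈ xs, key x ≤ M) →
      PySem.List.sorted xs key
        = PySem.List.sorted (xs.filter (fun x => decide (key x < M))) key
          ++ xs.filter (fun x => decide (key x = M)) := by
  intro xs
  induction xs using List.reverseRecOn with
  | nil => intro _; rfl
  | append_singleton t x ih =>
    intro hle
    have ht : ∀ y ∈ t, key y ≤ M := fun y hy => hle y (by simp [hy])
    have hx : key x ≤ M := hle x (by simp)
    rw [PySem.List.sorted_eq_foldl_insertBy (t ++ [x]) key, List.foldl_append,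
        ← PySem.List.sorted_eq_foldl_insertBy t key]
    simp only [List.foldl_cons, List.foldl_nil]
    rw [ih ht]
    by_cases hEq : key x = M
    · -- x goes to the very end
      rw [PySem.List.insertBy_of_forall_not_before]
      · simp [List.filter_append, hEq]
      · intro y hy
        have hy' : key y ≤ M := by
          rcases List.mem_append.mp hy with h1 | h1
          · exact ht _ ((PySem.List.mem_sorted _ _ _ _).mp h1 |> fun hm => (List.mem_filter.mp hm).1) |> id
          · exact ht _ (List.mem_filter.mp h1).1
        simp only [decide_eq_false_iff_not, not_lt]
        omega
    · have hlt : key x < M := lt_of_le_of_ne hx hEq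
      rw [insertBy_append_right]
      · rw [List.filter_append, List.filter_append]
        simp only [List.filter_cons, List.filter_nil, decide_eq_true_eq]
        rw [if_pos hlt, if_neg hEq]
        rw [PySem.List.sorted_eq_foldl_insertBy (t.filter _ ++ [x]) key, List.foldl_append,
            ← PySem.List.sorted_eq_foldl_insertBy (t.filter _) key]
        simp
      · intro y hy
        have := (List.mem_filter.mp hy).2
        simp only [decide_eq_true_eq] at this
        simp only [decide_eq_true_eq]
        omega

-- dict(L) for a nodup-keyed L is L itself
theorem items_ofList_nodup :
    ∀ (L : List (String × String)), (L.map Prod.fst).Nodup →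
      (PySem.Dict.ofList L).items = L := by
  intro L
  induction L using List.reverseRecOn with
  | nil => intro _; rfl
  | append_singleton t p ih =>
    intro hnd
    simp only [List.map_append, List.map_cons, List.map_nil] at hnd
    have hnd' := (List.nodup_append.mp hnd)
    have ht := ih hnd'.1
    have hp : p.1 ∉ t.map Prod.fst := fun hm => (hnd'.2.2 _ hm p.1 (by simp)) rfl
    simp only [PySem.Dict.ofList, PySem.Dict.update, List.foldl_append, List.foldl_cons,
      List.foldl_nil] at *
    have hc : (List.foldl (fun (acc : PySem.Dict String String) p => acc.insert p.1 p.2)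
        PySem.Dict.empty t).contains p.1 = false := by
      rw [PySem.Dict.contains, ht]
      simp only [List.any_eq_false]
      intro q hq
      simp only [Bool.not_eq_true]
      exact beq_eq_false_iff_ne.mpr (fun he => hp (List.mem_map.mpr ⟨q, hq, he⟩))
    rw [PySem.Dict.insert, hc]
    simp only [Bool.false_eq_true, if_false]
    rw [ht]

-- A's second loop appends exactly the header items whose key is not a base key
theorem phase2_items (base : List String) :
    ∀ (hs : List (String × String)) (d : PySem.Dict String String),
      (hs.map Prod.fst).Nodup →
      (∀ kv ∈ hs, d.contains kv.1 = base.any (fun b => b == kv.1)) →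
      (hs.foldl (fun d kv => if d.contains kv.1 then d else d.insert kv.1 kv.2) d).items
        = d.items ++ hs.filter (fun kv => !(base.any (fun b => b == kv.1))) := by
  intro hs
  induction hs with
  | nil => intro d _ _; simp
  | cons kv t ih =>
    intro d hnd hcont
    simp only [List.map_cons, List.nodup_cons] at hnd
    simp only [List.foldl_cons, List.filter_cons]
    cases hany : base.any (fun b => b == kv.1) with
    | true =>
      rw [show d.contains kv.1 = true from (hcont kv (by simp)).trans hany]
      simp only [if_true, Bool.not_true, Bool.false_eq_true, if_false]
      exact ih d hnd.2 (fun kv' h => hcont kv' (by simp [h]))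
    | false =>
      rw [show d.contains kv.1 = false from (hcont kv (by simp)).trans hany]
      simp only [Bool.false_eq_true, if_false, Bool.not_false, if_true]
      have hins : (d.insert kv.1 kv.2).items = d.items ++ [kv] := by
        rw [PySem.Dict.insert, (hcont kv (by simp)).trans hany]
        simp
      rw [ih (d.insert kv.1 kv.2) hnd.2 ?_]
      · rw [hins, List.append_assoc]
        rfl
      · intro kv' h
        have hne : (kv.1 == kv'.1) = false := by
          refine beq_eq_false_iff_ne.mpr ?_
          intro he
          exact hnd.1 (he ▸ List.mem_map.mpr ⟨kv', h, rfl⟩)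
        rw [PySem.Dict.contains, hins, List.any_append]
        simp only [List.any_cons, List.any_nil, Bool.or_false]
        rw [show (kv.1 == kv'.1) = false from hne]
        rw [← PySem.Dict.contains]
        simp [hcont kv' (by simp [h])]

-- ===== VERDICT (by name: the statement is the Claim_ definition above) =====
theorem fix_order_spec : Claim_equal_fix_order := by
  intro headers base _hdom hnd
  show fix_order headers base = fix_order_alt headers base
  obtain ⟨Rnd, Rpair, Rbnd, Rcont0⟩ := rank_facts base 0 PySem.Dict.empty (by simp [PySem.Dict.empty])
    (by simp [PySem.Dict.empty]) (by simp [PySem.Dict.empty])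
  have Rnd : ((rankD base).items.map Prod.fst).Nodup := Rnd
  have Rpair : ((rankD base).items.map Prod.snd).Pairwise (· < ·) := Rpair
  have Rbnd : ∀ i ∈ (rankD base).items.map Prod.snd, i < (base.length : Int) := by
    intro i hi
    have := Rbnd i hi
    omega
  have Rcont : ∀ k, (rankD base).contains k = base.any (fun b => b == k) := by
    intro k
    have h := Rcont0 k
    simpa [PySem.Dict.empty, PySem.Dict.contains] using h
  have g1 : ∀ ki ∈ (rankD base).items, (rankD base).get? ki.1 = some ki.2 := by
    intro ki hki
    show ((rankD base).items.find? (fun p => p.1 == ki.1)).map (fun x => x.2) = some ki.2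
    rw [find?_key_nodup _ Rnd hki]
    rfl
  have hkey_lt : ∀ kv : String × String, base.any (fun b => b == kv.1) = true →
      keyF base kv < (base.length : Int) := by
    intro kv h
    have hc : (rankD base).contains kv.1 = true := by rw [Rcont]; exact h
    rw [PySem.Dict.contains] at hc
    rcases List.any_eq_true.mp hc with ⟨q, hq, hbe⟩
    have hq1 : q.1 = kv.1 := eq_of_beq hbe
    have hg := g1 q hq
    rw [hq1] at hg
    show (rankD base).getD kv.1 _ < _
    rw [PySem.Dict.getD, hg]
    exact Rbnd q.2 (List.mem_map.mpr ⟨q, hq, rfl⟩)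
  have hkey_eq : ∀ kv : String × String, base.any (fun b => b == kv.1) = false →
      keyF base kv = (base.length : Int) := by
    intro kv h
    have hc : (rankD base).contains kv.1 = false := by rw [Rcont]; exact h
    rw [PySem.Dict.contains_eq_isSome_get?] at hc
    show (rankD base).getD kv.1 _ = _
    rw [PySem.Dict.getD]
    cases hg : (rankD base).get? kv.1
    · rfl
    · rw [hg] at hc; simp at hc
  have hkey_le : ∀ kv : String × String, keyF base kv ≤ (base.length : Int) := by
    intro kv
    cases hany : base.any (fun b => b == kv.1)
    · exact le_of_eq (hkey_eq kv hany)
    · exact le_of_lt (hkey_lt kv hany)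
  have hget_of_mem : ∀ kv ∈ headers, (PySem.Dict.mk headers).get? kv.1 = some kv.2 := by
    intro kv hm
    show (headers.find? (fun p => p.1 == kv.1)).map (fun x => x.2) = some kv.2
    rw [find?_key_nodup headers hnd hm]
    rfl
  have hmem_of_get : ∀ kv : String × String,
      (PySem.Dict.mk headers).get? kv.1 = some kv.2 → kv ∈ headers := by
    intro kv h
    simp only [PySem.Dict.get?, Option.map_eq_some_iff] at h
    rcases h with ⟨q, hq, h2⟩
    have hpred := List.find?_some hq
    have hq1 : q.1 = kv.1 := eq_of_beq hpred
    have hqe : q = kv := by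
      cases q; cases kv
      simp only at hq1 h2
      rw [hq1, h2]
    exact hqe ▸ List.mem_of_find?_eq_some hq
  have hmem_mid : ∀ kv : String × String, kv ∈ midL headers base ↔
      (base.any (fun b => b == kv.1) = true ∧ (PySem.Dict.mk headers).get? kv.1 = some kv.2) := by
    intro kv
    constructor
    · intro hm
      rcases List.mem_filterMap.mp hm with ⟨ki, hki, hpk⟩
      simp only [pickH, Option.map_eq_some_iff] at hpk
      rcases hpk with ⟨v, hv, hkv⟩
      have e1 : ki.1 = kv.1 := by rw [← hkv]
      have e2 : v = kv.2 := by rw [← hkv]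
      constructor
      · rw [← Rcont, PySem.Dict.contains]
        exact List.any_eq_true.mpr ⟨ki, hki, by simp [e1]⟩
      · rw [← e1, hv, e2]
    · rintro ⟨hany, hget⟩
      have hc : (rankD base).contains kv.1 = true := by rw [Rcont]; exact hany
      rw [PySem.Dict.contains] at hc
      rcases List.any_eq_true.mp hc with ⟨q, hq, hbe⟩
      have hq1 : q.1 = kv.1 := eq_of_beq hbe
      refine List.mem_filterMap.mpr ⟨q, hq, ?_⟩
      simp only [pickH, hq1, hget, Option.map_some]
  have hpair : (midL headers base).Pairwise (fun p q => keyF base p < keyF base q) := by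
    have hp0 : (rankD base).items.Pairwise (fun a b => a.2 < b.2) := List.pairwise_map.mp Rpair
    have hp1 : (rankD base).items.Pairwise
        (fun a b => a ∈ (rankD base).items ∧ b ∈ (rankD base).items ∧ a.2 < b.2) :=
      hp0.imp_of_mem (fun ha hb h => ⟨ha, hb, h⟩)
    refine List.Pairwise.filterMap (pickH headers) ?_ hp1
    intro a a' hr c hc c' hc'
    rcases hr with ⟨ha, ha', hlt⟩
    simp only [pickH, Option.map_eq_some_iff] at hc hc'
    rcases hc with ⟨v, hv, hcv⟩
    rcases hc' with ⟨v', hv', hcv'⟩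
    have e1 : c.1 = a.1 := by rw [← hcv]
    have e1' : c'.1 = a'.1 := by rw [← hcv']
    have k1 : keyF base c = a.2 := by
      show (rankD base).getD c.1 _ = a.2
      rw [e1, PySem.Dict.getD, g1 a ha]
      rfl
    have k1' : keyF base c' = a'.2 := by
      show (rankD base).getD c'.1 _ = a'.2
      rw [e1', PySem.Dict.getD, g1 a' ha']
      rfl
    rw [k1, k1']
    exact hlt
  have mid_nd : (midL headers base).Nodup := by
    refine hpair.imp ?_
    intro a b h he
    rw [he] at h
    exact lt_irrefl _ h
  have headers_nd : headers.Nodup := List.Nodup.of_map Prod.fst hnd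
  have hperm : (midL headers base).Perm
      (headers.filter (fun kv => decide (keyF base kv < (base.length : Int)))) := by
    rw [List.perm_ext_iff_of_nodup mid_nd (headers_nd.filter _)]
    intro kv
    rw [hmem_mid kv, List.mem_filter]
    constructor
    · rintro ⟨hany, hget⟩
      exact ⟨hmem_of_get kv hget, by simpa using hkey_lt kv hany⟩
    · rintro ⟨hm, hlt⟩
      simp only [decide_eq_true_eq] at hlt
      refine ⟨?_, hget_of_mem kv hm⟩
      cases hany : base.any (fun b => b == kv.1)
      · rw [hkey_eq kv hany] at hlt
        omega
      · rfl
  have hsortmid : PySem.List.sorted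
      (headers.filter (fun kv => decide (keyF base kv < (base.length : Int)))) (keyF base)
      = midL headers base :=
    PySem.List.sorted_eq_of_perm_of_pairwise_lt _ _ (keyF base) hperm hpair
  have hsplit := sorted_split (keyF base) (base.length : Int) headers (fun x _ => hkey_le x)
  have htail : headers.filter (fun kv => decide (keyF base kv = (base.length : Int)))
      = headers.filter (fun kv => !(base.any (fun b => b == kv.1))) := by
    apply List.filter_congr
    intro kv _
    cases hany : base.any (fun b => b == kv.1)
    · simp [hkey_eq kv hany]
    · have := hkey_lt kv hany
      simp only [Bool.not_true]
      apply decide_eq_false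
      omega
  have hBnd : ((PySem.List.sorted headers (keyF base)).map Prod.fst).Nodup := by
    have hp : (PySem.List.sorted headers (keyF base) false).Perm headers :=
      PySem.List.sorted_perm headers (keyF base) false
    exact ((hp.map Prod.fst).nodup_iff).mpr hnd
  have hB : fix_order_alt headers base = PySem.List.sorted headers (keyF base) := by
    show (PySem.Dict.ofList (PySem.List.sorted headers (keyF base))).items = _
    exact items_ofList_nodup _ hBnd
  have hApre : (base.foldl (fun d k =>
        match (PySem.Dict.mk headers).get? k with
        | some v => d.insert k v
        | none => d) (PySem.Dict.empty : PySem.Dict String String)).items = midL headers base :=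
    phase1_items headers base 0 PySem.Dict.empty PySem.Dict.empty rfl
  have hcont1 : ∀ kv ∈ headers, (base.foldl (fun d k =>
        match (PySem.Dict.mk headers).get? k with
        | some v => d.insert k v
        | none => d) (PySem.Dict.empty : PySem.Dict String String)).contains kv.1
        = base.any (fun b => b == kv.1) := by
    intro kv hm
    rw [PySem.Dict.contains, hApre]
    cases hany : base.any (fun b => b == kv.1)
    · simp only [List.any_eq_false]
      intro p hp
      rcases (hmem_mid p).mp hp with ⟨hpa, _⟩
      simp only [Bool.not_eq_true]
      refine beq_eq_false_iff_ne.mpr ?_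
      intro he
      rw [he, hany] at hpa
      cases hpa
    · exact List.any_eq_true.mpr ⟨kv, (hmem_mid kv).mpr ⟨hany, hget_of_mem kv hm⟩, by simp⟩
  have hA : fix_order headers base = midL headers base
      ++ headers.filter (fun kv => !(base.any (fun b => b == kv.1))) := by
    show (headers.foldl (fun d kv => if d.contains kv.1 then d else d.insert kv.1 kv.2)
        (base.foldl (fun d k =>
          match (PySem.Dict.mk headers).get? k with
          | some v => d.insert k v
          | none => d) (PySem.Dict.empty : PySem.Dict String String))).items = _
    rw [phase2_items base headers _ hnd hcont1, hApre]
  rw [hA, hB, hsplit, hsortmid, htail]
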